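-- pv_equiv track=rewrite | github.com/knrafto/trmphify | trmphify.py | trmph_url
-- ===== SOURCE A (Python) =====
-- def swap_move(move):
--     a, b = ord(move[0]) - ord('a'), int(move[1:]) - 1
--     return chr(b + ord('a')) + str(a + 1)
--
-- def trmph_url(size, little_golem_moves):
--     trmph_moves = []
--     for move in little_golem_moves:
--         if move == 'resign':
--             pass
--         elif move == 'swap':
--             move = swap_move(little_golem_moves[0])
--             trmph_moves = [move, move]
--         else:
--             trmph_moves.append(move)
--     return 'http://trmph.com/hex/board#{},{}'.format(size, ''.join(trmph_moves))
-- ===== SOURCE B (Python) =====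
-- def swap_move(move):
--     a, b = ord(move[0]) - ord('a'), int(move[1:]) - 1
--     return chr(b + ord('a')) + str(a + 1)
--
-- def _suffix_after_last_swap(moves):
--     # the sublist after the last 'swap', or None if there is no 'swap'
--     for i in reversed(range(len(moves))):
--         if moves[i] == 'swap':
--             return moves[i + 1:]
--     return None
--
-- def trmph_url(size, little_golem_moves):
--     tail = _suffix_after_last_swap(little_golem_moves)
--     if tail is None:
--         body = [m for m in little_golem_moves if m != 'resign']
--     else:
--         s = swap_move(little_golem_moves[0])
--         body = [s, s] + [m for m in tail if m != 'resign' and m != 'swap']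
--     return 'http://trmph.com/hex/board#{},{}'.format(size, ''.join(body))
-- ===== Notes on version B (the rewrite author's own statement) =====
-- stated objective: alternative
-- what changed: B replaces A's stateful forward loop, whose accumulator is reset to [s,s] at every 'swap', by a single backward search for the last 'swap' followed by one filter of the suffix after it (or of the whole list when there is no swap).
-- outside the precondition, e.g. on trmph_url(5, ['swap']): A raises ValueError, B raises ValueError; on trmph_url(5, ['', 'swap']): A raises IndexError, B raises IndexError
import Mathlib
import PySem

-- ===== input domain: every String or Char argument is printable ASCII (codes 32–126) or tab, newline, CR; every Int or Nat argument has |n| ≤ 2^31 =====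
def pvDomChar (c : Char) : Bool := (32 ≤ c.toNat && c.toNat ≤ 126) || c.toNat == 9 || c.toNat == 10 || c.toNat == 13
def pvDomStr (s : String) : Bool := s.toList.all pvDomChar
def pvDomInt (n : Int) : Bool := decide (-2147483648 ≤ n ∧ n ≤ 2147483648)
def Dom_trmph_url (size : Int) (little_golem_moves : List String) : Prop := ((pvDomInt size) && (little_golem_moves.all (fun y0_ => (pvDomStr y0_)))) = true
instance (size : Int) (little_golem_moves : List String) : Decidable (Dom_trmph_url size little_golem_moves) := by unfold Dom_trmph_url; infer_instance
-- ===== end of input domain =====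

-- B replaces A's stateful forward loop (accumulator reset at each 'swap') by one backward
-- search for the last 'swap' and a single filter of the suffix after it (objective: alternative).

-- ===== PORT A =====
-- swap_move, shared verbatim by both Python sources; returns none where Python raises
-- (empty move, non-integer tail).  chr is ported as Char.ofNat: exact for codepoints
-- 0..0x10FFFF outside the surrogate range — Pre_ restricts to those.
def swapMove? (m : String) : Option String :=
  match m.toList with
  | [] => none
  | c :: cs =>
    match PySem.Int.ofChars? cs with
    | none => none
    | some i =>
      let a : Int := (c.toNat : Int) - 97
      let b : Int := i - 1
      some (String.ofList (Char.ofNat (b + 97).toNat :: (PySem.Int.toStr (a + 1)).toList))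

-- swap_move(little_golem_moves[0]); .getD "" only fires outside Pre_ (Python raises there)
def swapOfHead (little_golem_moves : List String) : String :=
  ((PySem.List.pyGet? little_golem_moves 0).bind swapMove?).getD ""

def trmph_url (size : Int) (little_golem_moves : List String) : String :=
  let trmph_moves : List String :=
    little_golem_moves.foldl
      (fun acc move =>
        if move = "resign" then acc
        else if move = "swap" then
          [swapOfHead little_golem_moves, swapOfHead little_golem_moves]
        else acc ++ [move])
      []
  "http://trmph.com/hex/board#" ++ PySem.Int.toStr size ++ "," ++ PySem.Str.join "" trmph_moves

-- ===== PORT B =====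
-- _suffix_after_last_swap: the sublist after the last 'swap', or none if there is no 'swap'
def suffixAfterLastSwap : List String → Option (List String)
  | [] => none
  | m :: rest =>
    match suffixAfterLastSwap rest with
    | some t => some t
    | none => if m = "swap" then some rest else none

def trmph_url_alt (size : Int) (little_golem_moves : List String) : String :=
  let body : List String :=
    match suffixAfterLastSwap little_golem_moves with
    | none => little_golem_moves.filter (fun m => !(m = "resign"))
    | some t =>
      let s := swapOfHead little_golem_moves
      s :: s :: t.filter (fun m => !(m = "resign") && !(m = "swap"))
  "http://trmph.com/hex/board#" ++ PySem.Int.toStr size ++ "," ++ PySem.Str.join "" body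

-- ===== PRECONDITION & SPEC =====
-- Pre_ excludes exactly the inputs on which swap_move is called and either raises
-- (first move empty, non-integer tail, chr argument out of range 0..0x10FFFF) or
-- produces a lone-surrogate codepoint, which a Lean String cannot represent.
def swapHeadOk (m : String) : Bool :=
  match m.toList with
  | [] => false
  | _ :: cs =>
    match PySem.Int.ofChars? cs with
    | none => false
    | some n =>
      decide (0 ≤ n + 96) && decide (n + 96 ≤ 1114111) &&
        !(decide (55296 ≤ n + 96) && decide (n + 96 ≤ 57343))

def Pre_trmph_url (size : Int) (little_golem_moves : List String) : Prop :=
  "swap" ∈ little_golem_moves → swapHeadOk (little_golem_moves.headD "") = true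

instance (size : Int) (little_golem_moves : List String) : Decidable (Pre_trmph_url size little_golem_moves) := by
  unfold Pre_trmph_url; infer_instance

def pvWitness_trmph_url : Int × List String := (11, ["a1", "swap", "b3"])

def Spec_trmph_url (size : Int) (little_golem_moves : List String) (out : String) : Prop := out = trmph_url_alt size little_golem_moves
instance (size : Int) (little_golem_moves : List String) (out : String) : Decidable (Spec_trmph_url size little_golem_moves out) := by unfold Spec_trmph_url; infer_instance

-- ===== CLAIM (what is proved, stated in full; the proofs are below) =====
def Claim_equal_trmph_url : Prop := ∀ (size : Int) (little_golem_moves : List String), Dom_trmph_url size little_golem_moves → Pre_trmph_url size little_golem_moves → Spec_trmph_url size little_golem_moves (trmph_url size little_golem_moves)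

-- ===== LEMMAS AND PROOFS =====

-- no 'swap' below the last-swap marker
theorem suffix_none_not_swap (l : List String) (h : suffixAfterLastSwap l = none) :
    "swap" ∉ l := by
  induction l with
  | nil => simp
  | cons m rest ih =>
    simp only [suffixAfterLastSwap] at h
    cases hr : suffixAfterLastSwap rest with
    | some t => rw [hr] at h; simp at h
    | none =>
      rw [hr] at h
      simp only [List.mem_cons, not_or]
      constructor
      · intro hm; rw [← hm] at h; simp at h
      · exact ih hr

-- A's loop characterised by B's decomposition
theorem loopA (s : String) (l acc : List String) :
    l.foldl
      (fun acc move =>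
        if move = "resign" then acc
        else if move = "swap" then [s, s]
        else acc ++ [move]) acc
    = (match suffixAfterLastSwap l with
       | none => acc ++ l.filter (fun m => !(m = "resign"))
       | some t => s :: s :: t.filter (fun m => !(m = "resign") && !(m = "swap"))) := by
  induction l generalizing acc with
  | nil => simp [suffixAfterLastSwap]
  | cons m rest ih =>
    simp only [List.foldl_cons, suffixAfterLastSwap]
    rw [ih]
    by_cases hsw : m = "swap"
    · subst hsw
      cases hr : suffixAfterLastSwap rest with
      | some t => simp [hr]
      | none =>
        have hns := suffix_none_not_swap rest hr
        have hfil : rest.filter (fun x => !(x = "resign") && !(x = "swap"))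
            = rest.filter (fun x => !(x = "resign")) := by
          apply List.filter_congr
          intro x hx
          have hxs : x ≠ "swap" := fun h => hns (h ▸ hx)
          simp [hxs]
        simp [hr, hfil]
    · by_cases hres : m = "resign"
      · subst hres
        have hrs : ("resign" : String) ≠ "swap" := by decide
        cases hr : suffixAfterLastSwap rest <;> simp [hr, hrs, List.filter]
      · cases hr : suffixAfterLastSwap rest <;>
          simp [hr, hsw, hres, List.filter, List.append_assoc]

-- ===== VERDICT (by name: the statement is the Claim_ definition above) =====
theorem trmph_url_spec : Claim_equal_trmph_url := by
  intro size lgm _ _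
  unfold Spec_trmph_url trmph_url trmph_url_alt
  rw [loopA (swapOfHead lgm) lgm []]
  cases h : suffixAfterLastSwap lgm <;> simp [h]
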